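-- pv_equiv track=rewrite | github.com/yashsriram/yashsriram.github.io | utils.py | case_combinations
-- ===== SOURCE A (Python) =====
-- def title_and_lower_cases(word):
--     lower_case = word.lower()
--     title_case = lower_case[0].upper() + lower_case[1:]
--     return title_case, lower_case
--
-- def case_combinations_recr(original_words_list, combinations, index, combination):
--     if len(original_words_list) == index:
--         combinations.append(combination)
--         return
--     title_case, lower_case = title_and_lower_cases(original_words_list[index])
--     case_combinations_recr(original_words_list, combinations, index + 1, combination + [title_case])
--     case_combinations_recr(original_words_list, combinations, index + 1, combination + [lower_case])
--
-- def case_combinations(token):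
--     # split() returns list with no empty strings, split(' ') can return list with empty strings
--     words = token.split()
--     lowered_words = [word.lower() for word in words]
--     combinations = []
--     case_combinations_recr(lowered_words, combinations, 0, [])
--     joined_combinations = []
--     for combination in combinations:
--         joined_combinations.append(' '.join(combination))
--     return joined_combinations
-- ===== SOURCE B (Python) =====
-- def case_combinations(token):
--     # Iterative product: extend every partial combination with the
--     # title-case and lower-case form of the next word (title before lower,
--     # first word varies slowest), then join -- no recursion, no index.
--     combos = [[]]
--     for word in token.split():
--         lower = word.lower()
--         title = lower[0].upper() + lower[1:]
--         combos = [c + [w] for c in combos for w in (title, lower)]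
--     return [' '.join(c) for c in combos]
-- ===== Notes on version B (the rewrite author's own statement) =====
-- stated objective: simpler
-- what changed: Replaces the recursive accumulator-passing enumeration (plus a pre-lowering pass and a separate join loop) with a single iterative left-to-right product: each word extends every partial combination with its title/lower forms, then one comprehension joins them.
import Mathlib
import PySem

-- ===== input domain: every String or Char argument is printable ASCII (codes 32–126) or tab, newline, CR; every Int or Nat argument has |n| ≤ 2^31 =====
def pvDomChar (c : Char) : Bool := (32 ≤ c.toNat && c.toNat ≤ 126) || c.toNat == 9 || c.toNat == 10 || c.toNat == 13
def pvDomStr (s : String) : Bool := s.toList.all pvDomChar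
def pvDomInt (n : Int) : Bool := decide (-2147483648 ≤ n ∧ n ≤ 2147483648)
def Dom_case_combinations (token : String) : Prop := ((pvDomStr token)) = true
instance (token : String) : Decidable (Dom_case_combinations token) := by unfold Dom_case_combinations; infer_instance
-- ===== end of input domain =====

-- B replaces A's recursive accumulator enumeration (with separate lowering and joining passes)
-- by one iterative left-to-right product loop plus a join map; objective: simpler, same cost.


-- ===== PORT A =====
-- word.lower()[0] is ported as the slice word.lower()[0:1]: split() only yields
-- non-empty words, on which the two are the same one-character string.
def title_and_lower_cases (word : String) : String × String :=
  let lower_case := PySem.Str.lower word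
  let title_case :=
    PySem.Str.upper (PySem.Str.slice lower_case (some 0) (some 1)) ++
      PySem.Str.slice lower_case (some 1) none
  (title_case, lower_case)

-- the Python mutates `combinations` in place; the port threads it and returns its final value
def case_combinations_recr (ws : List String) (combinations : List (List String))
    (index : Nat) (combination : List String) : List (List String) :=
  if ws.length = index then
    combinations ++ [combination]
  else
    match hg : PySem.List.pyGet? ws (index : Int) with
    | none => combinations   -- unreachable: the Python only indexes in range
    | some w =>
      let tl := title_and_lower_cases w
      let combinations' := case_combinations_recr ws combinations (index + 1) (combination ++ [tl.1])
      case_combinations_recr ws combinations' (index + 1) (combination ++ [tl.2])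
termination_by ws.length - index
decreasing_by
  all_goals
    have hlt : index < ws.length := by
      by_contra hnot
      have : ws[index]? = none := by
        rw [List.getElem?_eq_none_iff]; omega
      rw [PySem.List.pyGet?_natCast] at hg
      simp [this] at hg
    omega

def case_combinations (token : String) : List String :=
  let words := PySem.Str.split₀ token
  let lowered_words := words.map (fun word => PySem.Str.lower word)
  let combinations := case_combinations_recr lowered_words [] 0 []
  combinations.foldl (fun joined c => joined ++ [PySem.Str.join " " c]) []

-- ===== PORT B =====
def case_combinations_alt (token : String) : List String :=
  let combos := (PySem.Str.split₀ token).foldl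
    (fun combos word =>
      let lower := PySem.Str.lower word
      let title :=
        PySem.Str.upper (PySem.Str.slice lower (some 0) (some 1)) ++
          PySem.Str.slice lower (some 1) none
      combos.flatMap (fun c => [c ++ [title], c ++ [lower]]))
    [[]]
  combos.map (fun c => PySem.Str.join " " c)

-- ===== PRECONDITION & SPEC =====
def Spec_case_combinations (token : String) (out : List String) : Prop := out = case_combinations_alt token
instance (token : String) (out : List String) : Decidable (Spec_case_combinations token out) := by unfold Spec_case_combinations; infer_instance

-- ===== CLAIM (what is proved, stated in full; the proofs are below) =====
def Claim_equal_case_combinations : Prop := ∀ (token : String), Dom_case_combinations token → Spec_case_combinations token (case_combinations token)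

-- ===== LEMMAS AND PROOFS =====

-- lowerChar is idempotent
theorem pv_lowerChar_idem (c : Char) : PySem.Chars.lowerChar (PySem.Chars.lowerChar c) = PySem.Chars.lowerChar c := by
  unfold PySem.Chars.lowerChar PySem.Chars.isupper
  split_ifs with h1 h2 <;> try rfl
  exfalso
  simp only [Bool.and_eq_true, decide_eq_true_eq, Char.le_def, UInt32.le_iff_toNat_le] at h1 h2
  obtain ⟨a1, a2⟩ := h1
  obtain ⟨b1, b2⟩ := h2
  simp only [Char.toNat] at *
  have hZ : ('Z':Char).val.toNat = 90 := by decide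
  have hA : ('A':Char).val.toNat = 65 := by decide
  have hv : (c.val.toNat + 32).isValidChar := Or.inl (by omega)
  have ht : (Char.ofNat (c.val.toNat + 32)).val.toNat = c.val.toNat + 32 := by
    have h := Char.toNat_ofNat (c.val.toNat + 32)
    simp only [Char.toNat] at h
    rw [h, if_pos hv]
  omega

theorem pv_lower_idem (s : String) : PySem.Str.lower (PySem.Str.lower s) = PySem.Str.lower s := by
  apply String.toList_injective
  simp [PySem.Str.toList_lower, PySem.Chars.lower, Function.comp, pv_lowerChar_idem]

theorem pv_tl_lower (w : String) : title_and_lower_cases (PySem.Str.lower w) = title_and_lower_cases w := by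
  simp [title_and_lower_cases, pv_lower_idem]

-- proof-side enumeration: all case combinations of ws appended to comb
def pvE (ws : List String) (comb : List String) : List (List String) :=
  match ws with
  | [] => [comb]
  | w :: rest =>
      pvE rest (comb ++ [(title_and_lower_cases w).1]) ++
        pvE rest (comb ++ [(title_and_lower_cases w).2])

-- A's recursion equals pvE on the dropped suffix
theorem pv_recr_eq (ws : List String) (index : Nat) (h : index ≤ ws.length)
    (acc : List (List String)) (comb : List String) :
    case_combinations_recr ws acc index comb = acc ++ pvE (ws.drop index) comb := by
  by_cases heq : ws.length = index
  · rw [case_combinations_recr, if_pos heq]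
    rw [← heq, List.drop_length]
    rfl
  · have hlt : index < ws.length := by omega
    rw [case_combinations_recr, if_neg heq]
    have hget : PySem.List.pyGet? ws (index : Int) = some ws[index] := by
      rw [PySem.List.pyGet?_natCast, List.getElem?_eq_getElem hlt]
    have hdrop : ws.drop index = ws[index] :: ws.drop (index + 1) :=
      List.drop_eq_getElem_cons hlt
    split
    · next hnone => rw [hget] at hnone; exact absurd hnone (by simp)
    · next w hsome =>
      rw [hget] at hsome
      injection hsome with hw
      subst hw
      rw [pv_recr_eq ws (index + 1) (by omega), pv_recr_eq ws (index + 1) (by omega)]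
      rw [hdrop]
      simp [pvE]
termination_by ws.length - index

-- pvE ignores pre-lowering of the words
theorem pv_pvE_lower (ws : List String) (comb : List String) :
    pvE (ws.map (fun w => PySem.Str.lower w)) comb = pvE ws comb := by
  induction ws generalizing comb with
  | nil => rfl
  | cons w rest ih => simp [pvE, pv_tl_lower, ih]

-- B's fold equals pvE spread over the accumulator
theorem pv_fold_eq (ws : List String) (start : List (List String)) :
    ws.foldl
      (fun combos word =>
        let lower := PySem.Str.lower word
        let title :=
          PySem.Str.upper (PySem.Str.slice lower (some 0) (some 1)) ++
            PySem.Str.slice lower (some 1) none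
        combos.flatMap (fun c => [c ++ [title], c ++ [lower]]))
      start
    = start.flatMap (fun c => pvE ws c) := by
  induction ws generalizing start with
  | nil => simp [pvE]
  | cons w rest ih =>
      rw [List.foldl_cons, ih]
      rw [List.flatMap_assoc]
      simp [pvE, title_and_lower_cases]

-- the append-join loop is a map
theorem pv_join_fold (l : List (List String)) (acc : List String) :
    l.foldl (fun joined c => joined ++ [PySem.Str.join " " c]) acc
      = acc ++ l.map (fun c => PySem.Str.join " " c) := by
  induction l generalizing acc with
  | nil => simp
  | cons c rest ih => simp [ih]

-- ===== VERDICT (by name: the statement is the Claim_ definition above) =====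
theorem case_combinations_spec : Claim_equal_case_combinations := by
  intro token _
  unfold Spec_case_combinations case_combinations case_combinations_alt
  dsimp only
  rw [pv_recr_eq _ 0 (by omega), pv_fold_eq, pv_join_fold]
  simp [pv_pvE_lower]
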